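-- pv_equiv track=rewrite | github.com/OchoaCoding/ChurchScheduler | Scheduler.py | getAvailablePeople
-- ===== SOURCE A (Python) =====
-- def getAvailablePeople(availPeople, workedPast2Weeks, workedToday):
--
--     newL = []
--     holderL = {}
--
--     # worked Today
--     for person in availPeople:
--
--         worked = False
--         for sess in workedToday:
--             if person in sess:
--                 worked = True
--
--         if not worked:
--             newL.append(person)
--
--     # Worked past 2 weeks
--     for wk in workedPast2Weeks:
--         for sess in wk:
--             for p in sess:
--
--                 if p in holderL:
--                     timesWorked = holderL[p]
--                     timesWorked += 1
--                     holderL[p] = timesWorked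
--                 else:
--                     holderL[p] = 1
--
--     deleteList = []
--     for person in holderL.keys():
--         times = holderL[person]
--         if times == 2:
--             deleteList.append(person)
--
--     l3 = [x for x in newL if x not in deleteList]
--
--     return l3
-- ===== SOURCE B (Python) =====
-- def getAvailablePeople(availPeople, workedPast2Weeks, workedToday):
--     result = []
--     for person in availPeople:
--         if any(person in sess for sess in workedToday):
--             continue
--         timesWorked = sum(1 for wk in workedPast2Weeks for sess in wk for p in sess if p == person)
--         if timesWorked != 2:
--             result.append(person)
--     return result
-- ===== Notes on version B (the rewrite author's own statement) =====
-- stated objective: simpler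
-- what changed: Replaces A's three separate phases (build newL, build a dict count index holderL over the 2-week data, build deleteList, then a final list-comprehension filter) by one pass over availPeople that decides each person on the spot with an any() membership test and a direct occurrence count (== 2 kept exact).
import Mathlib
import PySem

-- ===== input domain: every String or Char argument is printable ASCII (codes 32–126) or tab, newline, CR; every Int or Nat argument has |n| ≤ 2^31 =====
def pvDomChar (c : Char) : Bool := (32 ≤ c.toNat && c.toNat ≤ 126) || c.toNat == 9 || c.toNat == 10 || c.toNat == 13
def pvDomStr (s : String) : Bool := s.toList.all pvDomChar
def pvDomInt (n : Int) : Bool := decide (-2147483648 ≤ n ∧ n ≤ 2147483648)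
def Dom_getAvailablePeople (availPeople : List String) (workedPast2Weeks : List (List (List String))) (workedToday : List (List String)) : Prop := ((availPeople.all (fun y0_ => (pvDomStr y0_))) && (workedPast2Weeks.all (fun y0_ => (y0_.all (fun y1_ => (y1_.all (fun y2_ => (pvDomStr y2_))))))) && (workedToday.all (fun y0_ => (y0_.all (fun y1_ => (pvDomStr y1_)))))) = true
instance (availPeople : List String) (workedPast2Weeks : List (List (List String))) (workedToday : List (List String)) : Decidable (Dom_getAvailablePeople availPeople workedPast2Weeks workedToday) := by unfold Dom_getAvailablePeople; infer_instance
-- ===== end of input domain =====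

-- B replaces A's three phases (today-filter list, dict count index, delete list, final comprehension)
-- by a single pass over availPeople with an any() membership test and a direct occurrence count (simpler).


-- ===== PORT A =====
/-- Body of A's counting loop: `holderL[p] = holderL[p]+1 if p in holderL else 1`. -/
def pvAStep (d : PySem.Dict String Int) (p : String) : PySem.Dict String Int :=
  match d.get? p with
  | some timesWorked => d.insert p (timesWorked + 1)
  | none => d.insert p 1

def getAvailablePeople (availPeople : List String) (workedPast2Weeks : List (List (List String))) (workedToday : List (List String)) : List String :=
  -- worked Today
  let newL : List String := availPeople.foldl (fun newL person =>
    let worked : Bool := workedToday.foldl (fun worked sess =>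
      if sess.contains person then true else worked) false
    if !worked then newL ++ [person] else newL) []
  -- Worked past 2 weeks
  let holderL : PySem.Dict String Int := workedPast2Weeks.foldl (fun d wk =>
    wk.foldl (fun d sess =>
      sess.foldl (fun d p => pvAStep d p) d) d) PySem.Dict.empty
  let deleteList : List String := holderL.keys.foldl (fun dl person =>
    let times := holderL.getD person 0
    if times = 2 then dl ++ [person] else dl) []
  newL.filter (fun x => !(deleteList.contains x))

-- ===== PORT B =====
def getAvailablePeople_alt (availPeople : List String) (workedPast2Weeks : List (List (List String))) (workedToday : List (List String)) : List String :=
  availPeople.foldl (fun result person =>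
    if workedToday.any (fun sess => sess.contains person) then result
    else
      let timesWorked : Int := workedPast2Weeks.foldl (fun c wk =>
        wk.foldl (fun c sess =>
          sess.foldl (fun c p => if p == person then c + 1 else c) c) c) 0
      if timesWorked ≠ 2 then result ++ [person] else result) []

-- ===== PRECONDITION & SPEC =====
def Spec_getAvailablePeople (availPeople : List String) (workedPast2Weeks : List (List (List String))) (workedToday : List (List String)) (out : List String) : Prop := out = getAvailablePeople_alt availPeople workedPast2Weeks workedToday
instance (availPeople : List String) (workedPast2Weeks : List (List (List String))) (workedToday : List (List String)) (out : List String) : Decidable (Spec_getAvailablePeople availPeople workedPast2Weeks workedToday out) := by unfold Spec_getAvailablePeople; infer_instance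

-- ===== CLAIM (what is proved, stated in full; the proofs are below) =====
def Claim_equal_getAvailablePeople : Prop := ∀ (availPeople : List String) (workedPast2Weeks : List (List (List String))) (workedToday : List (List String)), Dom_getAvailablePeople availPeople workedPast2Weeks workedToday → Spec_getAvailablePeople availPeople workedPast2Weeks workedToday (getAvailablePeople availPeople workedPast2Weeks workedToday)

-- ===== LEMMAS AND PROOFS =====

/-- Folding over a flatMap is the nested fold. -/
theorem pvFoldlFlatMap {α β γ : Type} (g : α → List β) (f : γ → β → γ) :
    ∀ (l : List α) (init : γ),
      (l.flatMap g).foldl f init = l.foldl (fun a x => (g x).foldl f a) init := by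
  intro l
  induction l with
  | nil => intro init; rfl
  | cons x xs ih => intro init; simp [List.flatMap_cons, List.foldl_append, ih]

/-- The skip/skip/append loop body of B is a filter. -/
theorem pvFoldlSkip {α : Type} (P Q : α → Prop) [DecidablePred P] [DecidablePred Q] :
    ∀ (l : List α) (acc : List α),
      l.foldl (fun res x => if P x then res else if Q x then res ++ [x] else res) acc
        = acc ++ l.filter (fun x => !(decide (P x)) && decide (Q x)) := by
  intro l
  induction l with
  | nil => intro acc; simp
  | cons x xs ih =>
    intro acc
    by_cases hP : P x <;> by_cases hQ : Q x <;>
      simp [List.foldl_cons, hP, hQ, ih]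

/-- The flattened 2-week roster. -/
def pvFlat (workedPast2Weeks : List (List (List String))) : List String :=
  workedPast2Weeks.flatMap (fun wk => wk.flatMap (fun s => s))

theorem pvAStep_eq : pvAStep = fun d p => d.insert p (d.getD p 0 + 1) := by
  funext d p
  unfold pvAStep
  cases h : d.get? p with
  | none => simp [PySem.Dict.getD_eq_get?_getD, h]
  | some t => simp [PySem.Dict.getD_eq_get?_getD, h]

theorem pvHolderEqCounter (w2 : List (List (List String))) :
    w2.foldl (fun d wk =>
      wk.foldl (fun d sess =>
        sess.foldl (fun d p => pvAStep d p) d) d) (PySem.Dict.empty : PySem.Dict String Int)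
      = PySem.Dict.counter (pvFlat w2) := by
  simp only [pvAStep_eq]
  rw [← PySem.Dict.foldl_insert_getD_add_one_eq_counter, pvFlat, pvFoldlFlatMap]
  exact PySem.List.foldl_congr_mem w2 _ _ _
    (fun acc wk _ => (pvFoldlFlatMap (fun s => s) _ wk acc).symm)

theorem pvMemDelete (w2 : List (List (List String))) (x : String) :
    x ∈ (PySem.Set.ofList (pvFlat w2)).filter
        (fun p => decide (((pvFlat w2).count p : Int) = 2))
      ↔ ((pvFlat w2).count x : Int) = 2 := by
  constructor
  · intro h
    simp only [List.mem_filter, decide_eq_true_eq] at h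
    exact h.2
  · intro h
    have hx : x ∈ pvFlat w2 := by
      have h' : (pvFlat w2).count x = 2 := by exact_mod_cast h
      exact List.count_pos_iff.mp (by omega)
    simp only [List.mem_filter, decide_eq_true_eq]
    exact ⟨(PySem.Set.mem_ofList _ _).mpr hx, h⟩

theorem pvInnerCount (w2 : List (List (List String))) (person : String) :
    w2.foldl (fun c wk =>
      wk.foldl (fun c sess =>
        sess.foldl (fun c p => if p == person then c + 1 else c) c) c) (0 : Int)
      = ((pvFlat w2).count person : Int) := by
  have h1 := PySem.List.foldl_congr_mem w2
    (fun c wk => wk.foldl (fun c sess =>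
      sess.foldl (fun c p => if p == person then c + 1 else c) c) c)
    (fun c wk => (wk.flatMap (fun s => s)).foldl
      (fun c p => if p == person then c + 1 else c) c)
    (0 : Int)
    (fun acc wk _ => (pvFoldlFlatMap _ _ wk acc).symm)
  rw [h1, ← pvFoldlFlatMap, ← pvFlat, PySem.List.foldl_beq_add_one]
  simp

-- ===== VERDICT (by name: the statement is the Claim_ definition above) =====
theorem getAvailablePeople_spec : Claim_equal_getAvailablePeople := by
  intro ap w2 wt _
  unfold Spec_getAvailablePeople
  have hworked : ∀ (person : String),
      wt.foldl (fun worked sess => if sess.contains person then true else worked) false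
        = wt.any (fun sess => sess.contains person) := by
    intro person
    rw [PySem.List.foldl_if_true_eq]
    simp
  have hcount := pvInnerCount w2
  simp only [getAvailablePeople, getAvailablePeople_alt, hworked, hcount,
    pvHolderEqCounter w2]
  rw [PySem.List.foldl_append_if_eq_filter
        (fun person => !(wt.any (fun sess => sess.contains person))) ap [],
      PySem.List.foldl_append_ite_eq_filter
        (fun person => (PySem.Dict.counter (pvFlat w2)).getD person 0 = 2),
      PySem.Dict.keys_counter,
      pvFoldlSkip (fun person => wt.any (fun sess => sess.contains person) = true)
        (fun person => ((pvFlat w2).count person : Int) ≠ 2) ap []]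
  simp only [List.nil_append, List.filter_filter]
  have hdel : (PySem.Set.ofList (pvFlat w2)).filter
        (fun p => decide ((PySem.Dict.counter (pvFlat w2)).getD p 0 = 2))
      = (PySem.Set.ofList (pvFlat w2)).filter
        (fun p => decide (((pvFlat w2).count p : Int) = 2)) := by
    refine List.filter_congr (fun x _ => ?_)
    rw [PySem.Dict.getD_counter]
  rw [hdel]
  refine List.filter_congr (fun x _ => ?_)
  by_cases h2 : ((pvFlat w2).count x : Int) = 2 <;>
  by_cases ht : wt.any (fun sess => sess.contains x) <;>
    simp [h2, ht, List.contains_iff_mem, pvMemDelete w2 x] <;>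
    (rw [Bool.eq_iff_iff]; simp)
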